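-- pv_equiv track=rewrite | github.com/NCAR/CESM_postprocessing | averager/pyAverager/pyaverager/rover.py | get_slice_fn
-- ===== SOURCE A (Python) =====
-- def get_slice_fn(file_pattern, directory, prefix, suffix, stamp):
--
--     '''
--     Puts together a time slice filename
--
--     @param file_pattern   The file pattern that matches the input filenames.
--
--     @param directory      The directory where the input data is located.
--
--     @param prefix         The prefix that matches the input filenames.
--
--     @param suffix         The suffix that matches the input filenames.
--
--     @param stamp          The timestamp that matches the input filename.
--
--     @return filename      The name of the file.
--
--     @return file_prefix   The prefix of the file.
--
--     '''
--
--     filename = ''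
--     file_prefix = directory+'/'
--     stop = False
--
--     for p in file_pattern:
--         if p[0] == '$':
--             if p=='$prefix':
--                 filename = filename+prefix
--                 if not stop:
--                     file_prefix = file_prefix+prefix
--             if p=='$date_pattern':
--                 filename = filename+stamp
--                 stop = True
--             if p=='$suffix':
--                 filename = filename+suffix
--         else:
--             filename = filename+p
--             if not stop:
--                 file_prefix = file_prefix+p
--
--     return filename,file_prefix
-- ===== SOURCE B (Python) =====
-- def get_slice_fn(file_pattern, directory, prefix, suffix, stamp):
--     try:
--         split = file_pattern.index('$date_pattern')
--     except ValueError: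
--         split = len(file_pattern)
--
--     def tok(p):
--         if p[0] != '$':
--             return p
--         if p == '$prefix':
--             return prefix
--         if p == '$date_pattern':
--             return stamp
--         if p == '$suffix':
--             return suffix
--         return ''
--
--     def pre_tok(p):
--         if p[0] != '$':
--             return p
--         return prefix if p == '$prefix' else ''
--
--     filename = ''.join(tok(p) for p in file_pattern)
--     file_prefix = directory + '/' + ''.join(pre_tok(p) for p in file_pattern[:split])
--     return filename, file_prefix
-- ===== Notes on version B (the rewrite author's own statement) =====
-- stated objective: simpler
-- what changed: Replaces A's single flag-threaded fold over (filename, file_prefix, stop) with a computed split point (index of the first '$date_pattern', or the list length) plus two independent token-mapping passes: filename is a join of a per-token mapping over the whole pattern, and file_prefix is a join of a prefix-only mapping over the tokens before the split.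
import Mathlib
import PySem

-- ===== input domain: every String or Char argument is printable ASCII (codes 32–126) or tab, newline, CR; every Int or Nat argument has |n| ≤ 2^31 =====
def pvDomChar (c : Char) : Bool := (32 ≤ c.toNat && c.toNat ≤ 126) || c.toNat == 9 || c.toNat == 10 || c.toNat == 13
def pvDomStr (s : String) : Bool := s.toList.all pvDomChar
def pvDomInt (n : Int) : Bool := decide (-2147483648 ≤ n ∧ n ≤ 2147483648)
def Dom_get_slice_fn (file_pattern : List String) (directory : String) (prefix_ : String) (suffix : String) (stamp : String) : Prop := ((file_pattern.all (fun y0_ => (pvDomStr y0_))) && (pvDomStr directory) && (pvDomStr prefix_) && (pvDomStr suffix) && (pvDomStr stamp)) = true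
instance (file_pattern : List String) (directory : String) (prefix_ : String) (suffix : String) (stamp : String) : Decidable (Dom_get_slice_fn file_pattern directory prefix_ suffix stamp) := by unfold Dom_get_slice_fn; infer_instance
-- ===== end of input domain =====

-- B computes the '$date_pattern' split point once and builds the two results by two independent
-- token-mapping joins instead of A's single stop-flag-threaded accumulation pass (objective: simpler).


-- ===== PORT A =====
-- loop body of A: state is (filename, file_prefix, stop); p[0]=='$' is head? = '$' (empty p raises in Python, excluded by Pre_)
def pvStepA (prefix_ suffix stamp : String) (st : String × String × Bool) (p : String) : String × String × Bool :=
  if p.toList.head? = some '$' then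
    let st := if p = "$prefix" then (st.1 ++ prefix_, if st.2.2 = false then st.2.1 ++ prefix_ else st.2.1, st.2.2) else st
    let st := if p = "$date_pattern" then (st.1 ++ stamp, st.2.1, true) else st
    let st := if p = "$suffix" then (st.1 ++ suffix, st.2.1, st.2.2) else st
    st
  else
    (st.1 ++ p, if st.2.2 = false then st.2.1 ++ p else st.2.1, st.2.2)

def get_slice_fn (file_pattern : List String) (directory : String) (prefix_ : String) (suffix : String) (stamp : String) : String × String :=
  let r := file_pattern.foldl (pvStepA prefix_ suffix stamp) ("", directory ++ "/", false)
  (r.1, r.2.1)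

-- ===== PORT B =====
-- tok of Source B: the full filename contribution of one pattern token
def pvTok (prefix_ suffix stamp : String) (p : String) : String :=
  if ¬ (p.toList.head? = some '$') then p
  else if p = "$prefix" then prefix_
  else if p = "$date_pattern" then stamp
  else if p = "$suffix" then suffix
  else ""

-- pre_tok of Source B: the file_prefix contribution of one pattern token
def pvPreTok (prefix_ : String) (p : String) : String :=
  if ¬ (p.toList.head? = some '$') then p
  else if p = "$prefix" then prefix_ else ""

def get_slice_fn_alt (file_pattern : List String) (directory : String) (prefix_ : String) (suffix : String) (stamp : String) : String × String :=
  let split := (PySem.List.index? file_pattern "$date_pattern").getD file_pattern.length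
  let filename := PySem.Str.join "" (file_pattern.map (pvTok prefix_ suffix stamp))
  let file_prefix := directory ++ "/" ++ PySem.Str.join "" ((file_pattern.take split).map (pvPreTok prefix_))
  (filename, file_prefix)

-- ===== PRECONDITION & SPEC =====
-- Pre_ excludes patterns containing an empty token: Python A raises IndexError on p[0] there (and so does B).
def Pre_get_slice_fn (file_pattern : List String) (directory : String) (prefix_ : String) (suffix : String) (stamp : String) : Prop :=
  "" ∉ file_pattern
instance (file_pattern : List String) (directory : String) (prefix_ : String) (suffix : String) (stamp : String) : Decidable (Pre_get_slice_fn file_pattern directory prefix_ suffix stamp) := by unfold Pre_get_slice_fn; infer_instance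
def pvWitness_get_slice_fn : List String × String × String × String × String :=
  (["$prefix", "$date_pattern", "$suffix"], "data", "tas", ".nc", "1999-01")

def Spec_get_slice_fn (file_pattern : List String) (directory : String) (prefix_ : String) (suffix : String) (stamp : String) (out : String × String) : Prop := out = get_slice_fn_alt file_pattern directory prefix_ suffix stamp
instance (file_pattern : List String) (directory : String) (prefix_ : String) (suffix : String) (stamp : String) (out : String × String) : Decidable (Spec_get_slice_fn file_pattern directory prefix_ suffix stamp out) := by unfold Spec_get_slice_fn; infer_instance

-- ===== CLAIM (what is proved, stated in full; the proofs are below) =====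
def Claim_equal_get_slice_fn : Prop := ∀ (file_pattern : List String) (directory : String) (prefix_ : String) (suffix : String) (stamp : String), Dom_get_slice_fn file_pattern directory prefix_ suffix stamp → Pre_get_slice_fn file_pattern directory prefix_ suffix stamp → Spec_get_slice_fn file_pattern directory prefix_ suffix stamp (get_slice_fn file_pattern directory prefix_ suffix stamp)

-- ===== LEMMAS AND PROOFS =====
lemma pvJoinEmptyCons (s : String) (l : List String) :
    PySem.Str.join "" (s :: l) = s ++ PySem.Str.join "" l := by
  apply String.toList_injective
  cases l <;> simp [PySem.Str.join, PySem.Chars.join_cons_cons, PySem.Chars.join_singleton, PySem.Chars.join_nil]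

lemma pvJoinEmptyNil : PySem.Str.join "" ([] : List String) = "" := by
  simp [PySem.Str.join, PySem.Chars.join_nil]

-- for a non-'$date_pattern' token A's step appends tok to filename and pre_tok to the live prefix
lemma pvStepA_of_ne (prefix_ suffix stamp : String) (fn fpf : String) (stop : Bool) (p : String)
    (hd : p ≠ "$date_pattern") :
    pvStepA prefix_ suffix stamp (fn, fpf, stop) p =
      (fn ++ pvTok prefix_ suffix stamp p,
       (if stop then fpf else fpf ++ pvPreTok prefix_ p), stop) := by
  by_cases h1 : p.toList.head? = some '$'
  · by_cases hp : p = "$prefix"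
    · subst hp; cases stop <;> simp [pvStepA, pvTok, pvPreTok]
    · by_cases hs : p = "$suffix"
      · subst hs; cases stop <;> simp [pvStepA, pvTok, pvPreTok, hp]
      · cases stop <;> simp [pvStepA, pvTok, pvPreTok, h1, hp, hs, hd]
  · cases stop <;> simp [pvStepA, pvTok, pvPreTok, h1]

lemma pvStepA_date (prefix_ suffix stamp : String) (fn fpf : String) (stop : Bool) :
    pvStepA prefix_ suffix stamp (fn, fpf, stop) "$date_pattern" =
      (fn ++ stamp, fpf, true) := by
  simp [pvStepA]

-- the split point of a cons headed by a non-'$date_pattern' token steps past the head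
lemma pvTakeSplitCons (p : String) (t : List String) (hd : p ≠ "$date_pattern") :
    List.take ((PySem.List.index? (p :: t) "$date_pattern").getD (p :: t).length) (p :: t)
      = p :: List.take ((PySem.List.index? t "$date_pattern").getD t.length) t := by
  have hidx := PySem.List.index?_cons_of_ne (v := "$date_pattern") (xs := t) hd
  rw [hidx]
  cases PySem.List.index? t "$date_pattern" <;> simp

lemma pvFoldA (prefix_ suffix stamp : String) (l : List String) (fn fpf : String) (stop : Bool) :
    List.foldl (pvStepA prefix_ suffix stamp) (fn, fpf, stop) l =
      (fn ++ PySem.Str.join "" (l.map (pvTok prefix_ suffix stamp)),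
       (if stop then fpf
        else fpf ++ PySem.Str.join "" ((l.take ((PySem.List.index? l "$date_pattern").getD l.length)).map (pvPreTok prefix_))),
       stop || l.contains "$date_pattern") := by
  induction l generalizing fn fpf stop with
  | nil => cases stop <;> simp [pvJoinEmptyNil, PySem.List.index?]
  | cons p t ih =>
    by_cases hd : p = "$date_pattern"
    · subst hd
      rw [List.foldl_cons, pvStepA_date, ih]
      rw [PySem.List.index?_cons_self]
      cases stop <;>
        simp [List.map_cons, pvJoinEmptyCons, pvJoinEmptyNil, pvTok, String.append_assoc]
    · rw [List.foldl_cons, pvStepA_of_ne _ _ _ _ _ _ _ hd]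
      cases stop with
      | true =>
        rw [ih]
        simp [List.map_cons, pvJoinEmptyCons, String.append_assoc]
      | false =>
        rw [ih, pvTakeSplitCons _ _ hd]
        simp [List.map_cons, pvJoinEmptyCons, String.append_assoc, Ne.symm hd]

-- ===== VERDICT (by name: the statement is the Claim_ definition above) =====
theorem get_slice_fn_spec : Claim_equal_get_slice_fn := by
  intro fp dir pre suf stamp _ _
  unfold Spec_get_slice_fn get_slice_fn get_slice_fn_alt
  rw [pvFoldA]
  simp [String.append_assoc]
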